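-- pv_equiv track=rewrite | github.com/eolandro/IAAGO2025 | Tema3/Verde/Caballo 1 R005/caballo1.py | RT
-- ===== SOURCE A (Python) =====
-- def RT(M, NR, RR):
--     RR.append([F[:] for F in M])
--     if NR == 0:
--         return RR
--     n = len(M)
--
--     B = []
--
--     for j in range(n):
--         B.append(M[0][j])
--
--     for i in range(1, n-1):
--         B.append(M[i][n-1])
--
--     for j in range(n-1, -1, -1):
--         B.append(M[n-1][j])
--
--     for i in range(n-2, 0, -1):
--         B.append(M[i][0])
--     B = B[-3:] + B[:-3]
--     idx = 0
--
--     for j in range(n):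
--         M[0][j] = B[idx]
--         idx += 1
--
--     for i in range(1, n-1):
--         M[i][n-1] = B[idx]
--         idx += 1
--
--     for j in range(n-1, -1, -1):
--         M[n-1][j] = B[idx]
--         idx += 1
--
--     for i in range(n-2, 0, -1):
--         M[i][0] = B[idx]
--         idx += 1
--
--     return RT(M, NR - 1, RR)
-- ===== SOURCE B (Python) =====
-- # Iterative re-implementation: one border-coordinate list drives extraction,
-- # 3-shift and write-back; a while loop replaces the tail recursion.
-- # Same in-place mutation of M and RR as the original.
-- def RT(M, NR, RR):
--     RR.append([row[:] for row in M])
--     while NR != 0: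
--         n = len(M)
--         coords = ([(0, j) for j in range(n)]
--                   + [(i, n - 1) for i in range(1, n - 1)]
--                   + [(n - 1, j) for j in range(n - 1, -1, -1)]
--                   + [(i, 0) for i in range(n - 2, 0, -1)])
--         vals = [M[i][j] for i, j in coords]
--         rot = vals[-3:] + vals[:-3]
--         for (i, j), v in zip(coords, rot):
--             M[i][j] = v
--         RR.append([row[:] for row in M])
--         NR -= 1
--     return RR
-- ===== Notes on version B (the rewrite author's own statement) =====
-- stated objective: simpler
-- what changed: The tail recursion becomes an explicit while loop, and the eight hand-written border loops (four extracting, four writing back with a running index) are replaced by one border-coordinate list used to extract the values, rotate them by 3 with the same slice, and write them back via zip.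
import Mathlib
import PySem

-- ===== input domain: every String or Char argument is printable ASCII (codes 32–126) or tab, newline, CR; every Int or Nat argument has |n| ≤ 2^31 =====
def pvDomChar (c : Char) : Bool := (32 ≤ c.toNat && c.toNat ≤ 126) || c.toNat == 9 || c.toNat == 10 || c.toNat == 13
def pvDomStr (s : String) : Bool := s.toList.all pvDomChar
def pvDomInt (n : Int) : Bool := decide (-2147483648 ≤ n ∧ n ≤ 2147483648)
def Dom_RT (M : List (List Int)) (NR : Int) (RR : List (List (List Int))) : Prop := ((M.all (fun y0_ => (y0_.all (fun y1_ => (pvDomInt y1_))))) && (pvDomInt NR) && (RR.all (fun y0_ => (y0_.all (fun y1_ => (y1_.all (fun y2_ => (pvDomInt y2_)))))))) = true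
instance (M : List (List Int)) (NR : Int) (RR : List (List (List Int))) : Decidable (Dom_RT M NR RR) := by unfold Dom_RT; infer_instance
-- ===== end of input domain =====

-- B replaces the tail recursion by a loop and the eight border loops by one coordinate
-- list (extract / rotate-by-3 slice / zip write-back); equivalence is about the return
-- value (both Pythons also mutate M and RR identically).

-- shared cell accessors: M[i][j] read / write (exact inside Pre_RT, where IndexError is excluded)
def get2 (M : List (List Int)) (i j : Int) : Int :=
  PySem.List.pyGetD (PySem.List.pyGetD M i []) j 0
def set2 (M : List (List Int)) (i j : Int) (v : Int) : List (List Int) :=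
  PySem.List.pySetD M i (PySem.List.pySetD (PySem.List.pyGetD M i []) j v)

-- ===== PORT A =====
-- the rotation part of A's body (everything between the NR check and the recursive call)
def rotateA (M : List (List Int)) : List (List Int) :=
  let n : Int := M.length
  let B0 := (PySem.List.pyRange 0 n 1).foldl (fun B j => B ++ [get2 M 0 j]) []
  let B1 := (PySem.List.pyRange 1 (n-1) 1).foldl (fun B i => B ++ [get2 M i (n-1)]) B0
  let B2 := (PySem.List.pyRange (n-1) (-1) (-1)).foldl (fun B j => B ++ [get2 M (n-1) j]) B1
  let B3 := (PySem.List.pyRange (n-2) 0 (-1)).foldl (fun B i => B ++ [get2 M i 0]) B2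
  let B := PySem.List.slice B3 (some (-3)) none ++ PySem.List.slice B3 none (some (-3))
  let s0 := (PySem.List.pyRange 0 n 1).foldl
    (fun (p : List (List Int) × Int) j => (set2 p.1 0 j (PySem.List.pyGetD B p.2 0), p.2 + 1)) (M, 0)
  let s1 := (PySem.List.pyRange 1 (n-1) 1).foldl
    (fun (p : List (List Int) × Int) i => (set2 p.1 i (n-1) (PySem.List.pyGetD B p.2 0), p.2 + 1)) s0
  let s2 := (PySem.List.pyRange (n-1) (-1) (-1)).foldl
    (fun (p : List (List Int) × Int) j => (set2 p.1 (n-1) j (PySem.List.pyGetD B p.2 0), p.2 + 1)) s1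
  let s3 := (PySem.List.pyRange (n-2) 0 (-1)).foldl
    (fun (p : List (List Int) × Int) i => (set2 p.1 i 0 (PySem.List.pyGetD B p.2 0), p.2 + 1)) s2
  s3.1

def RT (M : List (List Int)) (NR : Int) (RR : List (List (List Int))) : List (List (List Int)) :=
  let RR' := RR ++ [M]           -- RR.append([F[:] for F in M])
  if NR = 0 then RR'
  else if NR < 0 then RR'        -- totality guard only: Python recurses forever here (outside Pre_RT)
  else RT (rotateA M) (NR - 1) RR'
termination_by NR.toNat
decreasing_by omega

-- ===== PORT B =====
def coordsB (n : Int) : List (Int × Int) :=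
  (PySem.List.pyRange 0 n 1).map (fun j => ((0:Int), j))
  ++ (PySem.List.pyRange 1 (n-1) 1).map (fun i => (i, n-1))
  ++ (PySem.List.pyRange (n-1) (-1) (-1)).map (fun j => (n-1, j))
  ++ (PySem.List.pyRange (n-2) 0 (-1)).map (fun i => (i, (0:Int)))

def rotateB (M : List (List Int)) : List (List Int) :=
  let n : Int := M.length
  let cs := coordsB n
  let vals := cs.map (fun c => get2 M c.1 c.2)
  let rot := PySem.List.slice vals (some (-3)) none ++ PySem.List.slice vals none (some (-3))
  (cs.zip rot).foldl (fun A cv => set2 A cv.1.1 cv.1.2 cv.2) M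

def RTloopB (M : List (List Int)) (NR : Int) (acc : List (List (List Int))) : List (List (List Int)) :=
  if NR = 0 then acc
  else if NR < 0 then acc        -- totality guard only: Python loops forever here (outside Pre_RT)
  else
    let M' := rotateB M
    RTloopB M' (NR - 1) (acc ++ [M'])
termination_by NR.toNat
decreasing_by omega

def RT_alt (M : List (List Int)) (NR : Int) (RR : List (List (List Int))) : List (List (List Int)) :=
  RTloopB M NR (RR ++ [M])

-- ===== PRECONDITION & SPEC =====
-- Pre_ excludes NR < 0 (A recurses forever, RecursionError) and, when NR ≠ 0, matrices
-- with a row shorter than len(M) (A raises IndexError on the border access).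
def Pre_RT (M : List (List Int)) (NR : Int) (RR : List (List (List Int))) : Prop :=
  0 ≤ NR ∧ (NR = 0 ∨ ∀ row ∈ M, (M.length : Int) ≤ row.length)
instance (M : List (List Int)) (NR : Int) (RR : List (List (List Int))) : Decidable (Pre_RT M NR RR) := by
  unfold Pre_RT; infer_instance

def pvWitness_RT : List (List Int) × Int × List (List (List Int)) := ([[1, 2], [3, 4]], 2, [])

def Spec_RT (M : List (List Int)) (NR : Int) (RR : List (List (List Int))) (out : List (List (List Int))) : Prop := out = RT_alt M NR RR
instance (M : List (List Int)) (NR : Int) (RR : List (List (List Int))) (out : List (List (List Int))) : Decidable (Spec_RT M NR RR out) := by unfold Spec_RT; infer_instance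

-- ===== CLAIM (what is proved, stated in full; the proofs are below) =====
def Claim_equal_RT : Prop := ∀ (M : List (List Int)) (NR : Int) (RR : List (List (List Int))), Dom_RT M NR RR → Pre_RT M NR RR → Spec_RT M NR RR (RT M NR RR)

-- ===== LEMMAS AND PROOFS =====

-- A's four extraction loops build exactly the values of B's coordinate list
lemma extract_eq (M : List (List Int)) (n : Int) :
    ((PySem.List.pyRange (n-2) 0 (-1)).foldl (fun B i => B ++ [get2 M i 0])
      ((PySem.List.pyRange (n-1) (-1) (-1)).foldl (fun B j => B ++ [get2 M (n-1) j])
        ((PySem.List.pyRange 1 (n-1) 1).foldl (fun B i => B ++ [get2 M i (n-1)])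
          ((PySem.List.pyRange 0 n 1).foldl (fun B j => B ++ [get2 M 0 j]) []))))
    = (coordsB n).map (fun c => get2 M c.1 c.2) := by
  simp only [PySem.List.foldl_append_singleton_eq_map]
  simp [coordsB, List.map_map, Function.comp_def, List.append_assoc]

-- A's sequential write-back (running index into B) = fold over coords zipped with B
lemma writeZip (B : List Int) (cs : List (Int × Int)) :
    ∀ (M0 : List (List Int)) (k : Nat), k + cs.length ≤ B.length →
    cs.foldl (fun (p : List (List Int) × Int) c => (set2 p.1 c.1 c.2 (PySem.List.pyGetD B p.2 0), p.2 + 1)) (M0, (k : Int))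
    = ((cs.zip (B.drop k)).foldl (fun A cv => set2 A cv.1.1 cv.1.2 cv.2) M0, (k : Int) + cs.length) := by
  induction cs with
  | nil => intro M0 k _; simp
  | cons c cs ih =>
    intro M0 k hk
    have hkB : k < B.length := by simp at hk; omega
    have hdrop : B.drop k = B[k] :: B.drop (k + 1) := List.drop_eq_getElem_cons hkB
    have hget : PySem.List.pyGetD B (k : Int) 0 = B[k] := by
      rw [PySem.List.pyGetD_natCast]; exact List.getD_eq_getElem B 0 hkB
    have hcast : ((k : Int) + 1) = ((k + 1 : Nat) : Int) := by push_cast; ring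
    simp only [List.foldl_cons, hget, hcast, hdrop, List.zip_cons_cons]
    rw [ih (set2 M0 c.1 c.2 B[k]) (k + 1) (by simp at hk ⊢; omega)]
    simp only [Prod.mk.injEq, List.length_cons]
    refine ⟨by trivial, by omega⟩

lemma length_rot (vals : List Int) :
    (PySem.List.slice vals (some (-3)) none ++ PySem.List.slice vals none (some (-3))).length
      = vals.length := by
  rw [PySem.List.slice_from_neg_ofNat vals 3 (by omega),
      PySem.List.slice_to_neg_ofNat vals 3 (by omega)]
  simp

-- the single rotation step: A's eight loops = B's coordinate-list pass
lemma step_eq (M : List (List Int)) : rotateA M = rotateB M := by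
  simp only [rotateA, rotateB]
  rw [extract_eq M (M.length : Int)]
  set cs := coordsB ((M.length : Nat) : Int) with hcs
  set vals := cs.map (fun c => get2 M c.1 c.2) with hvals
  set rot := PySem.List.slice vals (some (-3)) none ++ PySem.List.slice vals none (some (-3))
    with hrot
  have hlen : cs.length = rot.length := by
    rw [hrot, length_rot, hvals, List.length_map]
  have h2 : (cs.foldl (fun (p : List (List Int) × Int) c =>
        (set2 p.1 c.1 c.2 (PySem.List.pyGetD rot p.2 0), p.2 + 1)) (M, (0 : Int))).1
      = (cs.zip rot).foldl (fun A cv => set2 A cv.1.1 cv.1.2 cv.2) M := by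
    have h3 := writeZip rot cs M 0 (by omega)
    simp only [Nat.cast_zero, List.drop_zero] at h3
    rw [h3]
  rw [← h2]
  congr 1
  simp only [hcs, coordsB, List.foldl_append, List.foldl_map]

-- the recursions agree: A's tail recursion = B's loop with the snapshot accumulator
lemma main_eq (NR : Int) (M : List (List Int)) (RR : List (List (List Int))) :
    RT M NR RR = RTloopB M NR (RR ++ [M]) := by
  by_cases h0 : NR = 0
  · rw [RT, RTloopB]; simp [h0]
  · by_cases hn : NR < 0
    · rw [RT, RTloopB]; simp [h0, hn]
    · rw [RT, RTloopB]
      simp only [if_neg h0, if_neg hn]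
      rw [main_eq (NR - 1) (rotateA M) (RR ++ [M]), step_eq, List.append_assoc]
termination_by NR.toNat
decreasing_by omega

-- ===== VERDICT (by name: the statement is the Claim_ definition above) =====
theorem RT_spec : Claim_equal_RT := by
  intro M NR RR _ _
  unfold Spec_RT RT_alt
  exact main_eq NR M RR
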